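-- pv_equiv track=rewrite | github.com/Abdsamerhusari1/effektiv-problemlosning-5DV232 | word.py | solve
-- ===== SOURCE A (Python) =====
-- def solve(l, w):
--     # check if it is possible to form a word
--     if l*26 < w or l > w:
--         return "impossible"
--
--     result = []
--     while l > 0:
--         # determine the maximum weight a letter can have
--         max_letter_weight = min(26, w - l + 1)
--         # append the letter to the result
--         result.append(chr(ord('a') + max_letter_weight - 1))
--         # subtract the weight from the total weight
--         w -= max_letter_weight
--         # decrease the length
--         l -= 1
--     return ''.join(result)
-- ===== SOURCE B (Python) =====
-- def solve(l, w):
--     if l*26 < w or l > w: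
--         return "impossible"
--     extra = w - l
--     z, r = divmod(extra, 25)
--     tail = l - z - (1 if r else 0)
--     return 'z'*z + (chr(ord('a')+r) if r else '') + 'a'*tail
-- ===== Notes on version B (the rewrite author's own statement) =====
-- stated objective: simpler
-- what changed: Replaces the per-character greedy subtraction loop with a closed form: extra = w - l, z = extra // 25 z's, one transition letter chr(ord('a')+extra%25) if the remainder is nonzero, and a's for the rest.
import Mathlib
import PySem

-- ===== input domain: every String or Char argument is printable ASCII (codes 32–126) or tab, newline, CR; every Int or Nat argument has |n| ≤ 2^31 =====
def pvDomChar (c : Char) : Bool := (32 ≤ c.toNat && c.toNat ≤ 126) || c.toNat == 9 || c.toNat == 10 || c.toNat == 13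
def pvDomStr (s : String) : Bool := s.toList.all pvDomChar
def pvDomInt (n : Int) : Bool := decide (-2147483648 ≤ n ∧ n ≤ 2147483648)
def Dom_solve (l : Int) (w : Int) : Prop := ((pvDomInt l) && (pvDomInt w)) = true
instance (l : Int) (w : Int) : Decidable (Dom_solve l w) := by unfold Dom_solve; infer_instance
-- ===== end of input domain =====

-- B replaces A's per-character greedy loop by a closed-form construction (simpler); return values proved equal on all inputs.

-- ===== PORT A =====
-- the 'while l > 0' loop of A; result accumulates the characters appended so far
def solveLoop (l : Int) (w : Int) (result : List Char) : List Char :=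
  if _h : l > 0 then
    let max_letter_weight := min 26 (w - l + 1)
    -- chr(ord('a') + max_letter_weight - 1); inside the loop the code is always 97 + (mlw-1) with mlw ≥ 1 on inputs that pass A's guard
    solveLoop (l - 1) (w - max_letter_weight)
      (result ++ [Char.ofNat (97 + (max_letter_weight - 1).toNat)])
  else result
termination_by l.toNat
decreasing_by omega

def solve (l : Int) (w : Int) : String :=
  if l * 26 < w ∨ l > w then "impossible"
  else String.mk (solveLoop l w [])

-- ===== PORT B =====
def solve_alt (l : Int) (w : Int) : String :=
  if l * 26 < w ∨ l > w then "impossible"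
  else
    let extra := w - l
    let z := PySem.Int.floordiv extra 25
    let r := PySem.Int.mod extra 25
    let tail := l - z - (if r ≠ 0 then 1 else 0)
    String.mk (List.replicate z.toNat 'z'
      ++ (if r ≠ 0 then [Char.ofNat (97 + r.toNat)] else [])
      ++ List.replicate tail.toNat 'a')

-- ===== PRECONDITION & SPEC =====
def Spec_solve (l : Int) (w : Int) (out : String) : Prop := out = solve_alt l w
instance (l : Int) (w : Int) (out : String) : Decidable (Spec_solve l w out) := by unfold Spec_solve; infer_instance

-- ===== CLAIM (what is proved, stated in full; the proofs are below) =====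
def Claim_equal_solve : Prop := ∀ (l : Int) (w : Int), Dom_solve l w → Spec_solve l w (solve l w)

-- ===== LEMMAS AND PROOFS =====

-- closed form of what B builds, in Nat, for length n and extra weight e
def specChars (n e : Nat) : List Char :=
  List.replicate (e / 25) 'z'
    ++ (if e % 25 ≠ 0 then [Char.ofNat (97 + e % 25)] else [])
    ++ List.replicate (n - e / 25 - (if e % 25 ≠ 0 then 1 else 0)) 'a'

theorem specChars_zero (n : Nat) : specChars n 0 = List.replicate n 'a' := by
  simp [specChars]

theorem specChars_z (n e : Nat) (h : 25 ≤ e) :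
    specChars (n + 1) e = 'z' :: specChars n (e - 25) := by
  have hdiv : e / 25 = (e - 25) / 25 + 1 := by omega
  have hmod : e % 25 = (e - 25) % 25 := by omega
  have hlen : n + 1 - ((e - 25) / 25 + 1) = n - (e - 25) / 25 := by omega
  simp only [specChars, hdiv, ← hmod, hlen, List.replicate_succ, List.cons_append]

theorem solveLoop_spec (n : Nat) : ∀ (l w : Int) (acc : List Char),
    l = (n : Int) → l ≤ w → w ≤ 26 * l →
    solveLoop l w acc = acc ++ specChars n (w - l).toNat := by
  induction n with
  | zero =>
    intro l w acc hl hlw hwl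
    unfold solveLoop
    have h0 : ¬ l > 0 := by omega
    have he : (w - l).toNat = 0 := by omega
    simp [h0, he, specChars]
  | succ m ih =>
    intro l w acc hl hlw hwl
    unfold solveLoop
    have hpos : l > 0 := by omega
    simp only [hpos, dif_pos]
    by_cases h25 : (25 : Int) ≤ w - l
    · -- letter 'z', extra drops by 25
      have hm : min 26 (w - l + 1) = 26 := by omega
      rw [hm, ih (l - 1) (w - 26) _ (by omega) (by omega) (by omega)]
      have hch : Char.ofNat (97 + ((26 : Int) - 1).toNat) = 'z' := by decide
      have he : (w - l).toNat = (w - 26 - (l - 1)).toNat + 25 := by omega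
      rw [hch, he, specChars_z m _ (by omega)]
      simp
    · by_cases h0 : w - l = 0
      · -- extra 0: letter 'a'
        have hm : min 26 (w - l + 1) = 1 := by omega
        rw [hm, ih (l - 1) (w - 1) _ (by omega) (by omega) (by omega)]
        have he : (w - l).toNat = 0 := by omega
        have he' : (w - 1 - (l - 1)).toNat = 0 := by omega
        have hch : Char.ofNat (97 + ((1 : Int) - 1).toNat) = 'a' := by decide
        rw [hch, he, he', specChars_zero, specChars_zero]
        simp [← List.replicate_succ]
      · -- 0 < extra < 25: the transition letter, then all 'a'
        have hm : min 26 (w - l + 1) = w - l + 1 := by omega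
        rw [hm, ih (l - 1) (w - (w - l + 1)) _ (by omega) (by omega) (by omega)]
        have he' : (w - (w - l + 1) - (l - 1)).toNat = 0 := by omega
        rw [he', specChars_zero]
        have heb : 0 < (w - l).toNat ∧ (w - l).toNat < 25 := by omega
        have hdiv : (w - l).toNat / 25 = 0 := by omega
        have hmod : (w - l).toNat % 25 = (w - l).toNat := by omega
        have hc : (w - l + 1 - 1).toNat = (w - l).toNat := by omega
        simp only [specChars, hdiv, hmod, hc, List.replicate_zero, List.nil_append]
        have : ¬ (w - l).toNat = 0 := by omega
        simp only [this, ne_eq, not_false_eq_true, if_pos]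
        have hrep : m + 1 - 0 - 1 = m := by omega
        rw [hrep]
        simp

theorem specChars_eq_alt (l w : Int) (hlw : l ≤ w) (hwl : w ≤ 26 * l) :
    (List.replicate (PySem.Int.floordiv (w - l) 25).toNat 'z'
      ++ (if PySem.Int.mod (w - l) 25 ≠ 0 then
            [Char.ofNat (97 + (PySem.Int.mod (w - l) 25).toNat)] else [])
      ++ List.replicate (l - PySem.Int.floordiv (w - l) 25
            - (if PySem.Int.mod (w - l) 25 ≠ 0 then 1 else 0)).toNat 'a')
    = specChars l.toNat (w - l).toNat := by
  have hl0 : 0 ≤ l := by omega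
  rw [PySem.Int.floordiv_eq_ediv_of_pos (by omega), PySem.Int.mod_eq_emod_of_pos (by omega)]
  have hz : ((w - l) / 25).toNat = (w - l).toNat / 25 := by omega
  have hr : ((w - l) % 25).toNat = (w - l).toNat % 25 := by omega
  by_cases h : (w - l) % 25 = 0
  · have h' : ¬ ((w - l) % 25 ≠ 0) := by omega
    have h2 : ¬ ((w - l).toNat % 25 ≠ 0) := by omega
    have ht : (l - (w - l) / 25 - 0).toNat = l.toNat - (w - l).toNat / 25 - 0 := by omega
    simp only [specChars, if_neg h', if_neg h2, hz, ht]
  · have h' : (w - l) % 25 ≠ 0 := by omega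
    have h2 : (w - l).toNat % 25 ≠ 0 := by omega
    have ht : (l - (w - l) / 25 - 1).toNat = l.toNat - (w - l).toNat / 25 - 1 := by omega
    simp only [specChars, if_pos h', if_pos h2, hz, hr, ht]

-- ===== VERDICT (by name: the statement is the Claim_ definition above) =====
theorem solve_spec : Claim_equal_solve := by
  intro l w _
  unfold Spec_solve solve solve_alt
  by_cases hg : l * 26 < w ∨ l > w
  · simp [hg]
  · simp only [hg, if_neg, not_false_eq_true]
    push_neg at hg
    obtain ⟨h1, h2⟩ := hg
    have hl0 : 0 ≤ l := by nlinarith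
    rw [solveLoop_spec l.toNat l w [] (by omega) h2 (by omega), List.nil_append,
      specChars_eq_alt l w h2 (by omega)]
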